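-- pv_equiv track=rewrite | github.com/MeoPBK/NeuralEvolution | src/rendering/menu_G/neural_network_schematic.py | _is_hidden_neuron_mutated
-- ===== SOURCE A (Python) =====
-- def _is_hidden_neuron_mutated(h_idx, mutation_hotspots, brain, is_rnn=False):
--     """Check if a hidden neuron has mutated connections."""
--     # Check input connections to this hidden neuron
--     for i in range(16):
--         idx = h_idx * 16 + i
--         if idx in mutation_hotspots:
--             return True
--
--     if is_rnn:
--         # Check recurrent connections
--         base_idx = 96
--         for h in range(6):
--             idx = base_idx + h_idx * 6 + h
--             if idx in mutation_hotspots: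
--                 return True
--             idx = base_idx + h * 6 + h_idx
--             if idx in mutation_hotspots:
--                 return True
--
--         # Check hidden bias (after recurrent)
--         bias_idx = 96 + 36 + h_idx
--         if bias_idx in mutation_hotspots:
--             return True
--
--         # Check output connections from this hidden neuron
--         base_idx = 96 + 36 + 6
--         for o in range(4):
--             idx = base_idx + o * 6 + h_idx
--             if idx in mutation_hotspots:
--                 return True
--     else:
--         # Check hidden bias
--         bias_idx = 96 + h_idx
--         if bias_idx in mutation_hotspots:
--             return True
--
--         # Check output connections from this hidden neuron
--         base_idx = 96 + 6
--         for o in range(4):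
--             idx = base_idx + o * 6 + h_idx
--             if idx in mutation_hotspots:
--                 return True
--
--     return False
-- ===== SOURCE B (Python) =====
-- def _is_hidden_neuron_mutated(h_idx, mutation_hotspots, brain, is_rnn=False):
--     """Check if a hidden neuron has mutated connections.
--
--     Inverse-mapping form: scan the hotspot list once and decode each flat
--     weight index arithmetically (floor division / residue tests) to decide
--     whether it belongs to neuron h_idx, instead of enumerating candidates."""
--     for idx in mutation_hotspots:
--         # input weight block: rows of 16 per hidden neuron
--         if idx // 16 == h_idx:
--             return True
--         if is_rnn:
--             # recurrent row h_idx (96 + h_idx*6 + h, h in [0,6))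
--             if (idx - 96) // 6 == h_idx:
--                 return True
--             # recurrent column h_idx (96 + h*6 + h_idx, h in [0,6))
--             d = idx - 96 - h_idx
--             if 0 <= d < 36 and d % 6 == 0:
--                 return True
--             # hidden bias after recurrent block
--             if idx == 132 + h_idx:
--                 return True
--             # output column h_idx (138 + o*6 + h_idx, o in [0,4))
--             d = idx - 138 - h_idx
--             if 0 <= d < 24 and d % 6 == 0:
--                 return True
--         else:
--             # hidden bias
--             if idx == 96 + h_idx:
--                 return True
--             # output column h_idx (102 + o*6 + h_idx, o in [0,4))
--             d = idx - 102 - h_idx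
--             if 0 <= d < 24 and d % 6 == 0:
--                 return True
--     return False
-- ===== Notes on version B (the rewrite author's own statement) =====
-- stated objective: alternative
-- what changed: Inverts the mapping: instead of enumerating all candidate weight indices of the neuron and testing membership, B scans the hotspot list once and arithmetically decodes each flat index (floor division and residue/range tests) to decide whether it belongs to neuron h_idx.
import Mathlib
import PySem

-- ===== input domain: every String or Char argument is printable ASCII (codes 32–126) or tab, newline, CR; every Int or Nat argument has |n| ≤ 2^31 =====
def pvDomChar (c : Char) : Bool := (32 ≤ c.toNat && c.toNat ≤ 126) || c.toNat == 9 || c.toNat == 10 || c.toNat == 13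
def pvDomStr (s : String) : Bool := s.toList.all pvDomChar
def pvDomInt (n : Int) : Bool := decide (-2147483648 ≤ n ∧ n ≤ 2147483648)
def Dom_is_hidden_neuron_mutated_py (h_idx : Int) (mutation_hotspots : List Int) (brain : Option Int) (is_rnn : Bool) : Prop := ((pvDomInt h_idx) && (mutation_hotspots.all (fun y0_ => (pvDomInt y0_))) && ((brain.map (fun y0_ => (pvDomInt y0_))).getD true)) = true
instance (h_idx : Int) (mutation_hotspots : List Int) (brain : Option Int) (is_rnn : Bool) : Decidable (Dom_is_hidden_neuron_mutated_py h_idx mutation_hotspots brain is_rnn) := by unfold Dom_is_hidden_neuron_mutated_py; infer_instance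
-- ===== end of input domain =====

-- ===== PORT A =====
-- B scans the hotspot list once and arithmetically DECODES each flat index (floor division /
-- residue tests) instead of A's enumeration of candidate indices with membership loops (objective: alternative).
def is_hidden_neuron_mutated_py (h_idx : Int) (mutation_hotspots : List Int) (brain : Option Int) (is_rnn : Bool) : Bool :=
  if (PySem.List.pyRange 0 16 1).any (fun i => mutation_hotspots.contains (h_idx * 16 + i)) then
    true
  else if is_rnn then
    if (PySem.List.pyRange 0 6 1).any (fun h =>
        mutation_hotspots.contains (96 + h_idx * 6 + h) || mutation_hotspots.contains (96 + h * 6 + h_idx)) then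
      true
    else if mutation_hotspots.contains (96 + 36 + h_idx) then
      true
    else
      (PySem.List.pyRange 0 4 1).any (fun o => mutation_hotspots.contains (96 + 36 + 6 + o * 6 + h_idx))
  else
    if mutation_hotspots.contains (96 + h_idx) then
      true
    else
      (PySem.List.pyRange 0 4 1).any (fun o => mutation_hotspots.contains (96 + 6 + o * 6 + h_idx))

-- ===== PORT B =====
-- per-hotspot decoder of Source B's loop body (exact: Python // and % are PySem.Int.floordiv / mod)
def pvTouches (h_idx : Int) (is_rnn : Bool) (idx : Int) : Bool :=
  if PySem.Int.floordiv idx 16 == h_idx then true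
  else if is_rnn then
    if PySem.Int.floordiv (idx - 96) 6 == h_idx then true
    else if (let d := idx - 96 - h_idx; decide (0 ≤ d) && decide (d < 36) && (PySem.Int.mod d 6 == 0)) then true
    else if idx == 132 + h_idx then true
    else (let d := idx - 138 - h_idx; decide (0 ≤ d) && decide (d < 24) && (PySem.Int.mod d 6 == 0))
  else
    if idx == 96 + h_idx then true
    else (let d := idx - 102 - h_idx; decide (0 ≤ d) && decide (d < 24) && (PySem.Int.mod d 6 == 0))

def is_hidden_neuron_mutated_py_alt (h_idx : Int) (mutation_hotspots : List Int) (brain : Option Int) (is_rnn : Bool) : Bool :=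
  mutation_hotspots.any (pvTouches h_idx is_rnn)

-- ===== PRECONDITION & SPEC =====
def Spec_is_hidden_neuron_mutated_py (h_idx : Int) (mutation_hotspots : List Int) (brain : Option Int) (is_rnn : Bool) (out : Bool) : Prop := out = is_hidden_neuron_mutated_py_alt h_idx mutation_hotspots brain is_rnn
instance (h_idx : Int) (mutation_hotspots : List Int) (brain : Option Int) (is_rnn : Bool) (out : Bool) : Decidable (Spec_is_hidden_neuron_mutated_py h_idx mutation_hotspots brain is_rnn out) := by unfold Spec_is_hidden_neuron_mutated_py; infer_instance

-- ===== CLAIM (what is proved, stated in full; the proofs are below) =====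
def Claim_equal_is_hidden_neuron_mutated_py : Prop := ∀ (h_idx : Int) (mutation_hotspots : List Int) (brain : Option Int) (is_rnn : Bool), Dom_is_hidden_neuron_mutated_py h_idx mutation_hotspots brain is_rnn → Spec_is_hidden_neuron_mutated_py h_idx mutation_hotspots brain is_rnn (is_hidden_neuron_mutated_py h_idx mutation_hotspots brain is_rnn)

-- ===== LEMMAS AND PROOFS =====

-- B's decoder accepts exactly A's candidate indices (non-RNN layout)
theorem touches_iff_false (h x : Int) :
    pvTouches h false x = true ↔
      (∃ i ∈ ([0,1,2,3,4,5,6,7,8,9,10,11,12,13,14,15] : List Int), x = h * 16 + i) ∨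
      x = 96 + h ∨
      (∃ o ∈ ([0,1,2,3] : List Int), x = 96 + 6 + o * 6 + h) := by
  simp only [pvTouches, Bool.if_true_left, Bool.or_eq_true, beq_iff_eq,
    Bool.and_eq_true, decide_eq_true_iff, PySem.Int.mod_eq_zero_iff_dvd,
    Bool.false_eq_true, if_false,
    PySem.Int.floordiv_eq_iff_of_pos (a := x) (b := 16) (show (0:Int) < 16 by omega),
    List.mem_cons, List.not_mem_nil, or_false, exists_eq_or_imp, exists_eq_left]
  omega

-- B's decoder accepts exactly A's candidate indices (RNN layout)
theorem touches_iff_true (h x : Int) :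
    pvTouches h true x = true ↔
      (∃ i ∈ ([0,1,2,3,4,5,6,7,8,9,10,11,12,13,14,15] : List Int), x = h * 16 + i) ∨
      (∃ k ∈ ([0,1,2,3,4,5] : List Int), x = 96 + h * 6 + k ∨ x = 96 + k * 6 + h) ∨
      x = 96 + 36 + h ∨
      (∃ o ∈ ([0,1,2,3] : List Int), x = 96 + 36 + 6 + o * 6 + h) := by
  simp only [pvTouches, Bool.if_true_left, Bool.or_eq_true, beq_iff_eq,
    Bool.and_eq_true, decide_eq_true_iff, PySem.Int.mod_eq_zero_iff_dvd,
    if_true,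
    PySem.Int.floordiv_eq_iff_of_pos (a := x) (b := 16) (show (0:Int) < 16 by omega),
    PySem.Int.floordiv_eq_iff_of_pos (a := x - 96) (b := 6) (show (0:Int) < 6 by omega),
    List.mem_cons, List.not_mem_nil, or_false, exists_eq_or_imp, exists_eq_left]
  omega

-- ===== VERDICT (by name: the statement is the Claim_ definition above) =====
set_option maxHeartbeats 1000000 in
theorem is_hidden_neuron_mutated_py_spec : Claim_equal_is_hidden_neuron_mutated_py := by
  intro h_idx hot brain is_rnn _
  unfold Spec_is_hidden_neuron_mutated_py
  rw [Bool.eq_iff_iff]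
  cases is_rnn with
  | false =>
    simp only [is_hidden_neuron_mutated_py, is_hidden_neuron_mutated_py_alt,
      List.any_eq_true, touches_iff_false,
      show PySem.List.pyRange 0 16 1 = [0,1,2,3,4,5,6,7,8,9,10,11,12,13,14,15] from by decide,
      show PySem.List.pyRange 0 4 1 = [0,1,2,3] from by decide,
      Bool.if_true_left, Bool.or_eq_true, List.contains_eq_mem, decide_eq_true_iff,
      Bool.false_eq_true, if_false]
    constructor
    · rintro (h1 | h2 | h3)
      · obtain ⟨i, hi, hm⟩ := h1; exact ⟨_, hm, Or.inl ⟨i, hi, rfl⟩⟩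
      · exact ⟨_, h2, Or.inr (Or.inl rfl)⟩
      · obtain ⟨o, ho, hm⟩ := h3; exact ⟨_, hm, Or.inr (Or.inr ⟨o, ho, rfl⟩)⟩
    · rintro ⟨x, hx, (⟨i, hi, rfl⟩ | rfl | ⟨o, ho, rfl⟩)⟩
      · exact Or.inl ⟨i, hi, hx⟩
      · exact Or.inr (Or.inl hx)
      · exact Or.inr (Or.inr ⟨o, ho, hx⟩)
  | true =>
    simp only [is_hidden_neuron_mutated_py, is_hidden_neuron_mutated_py_alt,
      List.any_eq_true, touches_iff_true,
      show PySem.List.pyRange 0 16 1 = [0,1,2,3,4,5,6,7,8,9,10,11,12,13,14,15] from by decide,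
      show PySem.List.pyRange 0 6 1 = [0,1,2,3,4,5] from by decide,
      show PySem.List.pyRange 0 4 1 = [0,1,2,3] from by decide,
      Bool.if_true_left, Bool.or_eq_true, List.contains_eq_mem, decide_eq_true_iff,
      if_true]
    constructor
    · rintro (h1 | h2 | h3 | h4)
      · obtain ⟨i, hi, hm⟩ := h1; exact ⟨_, hm, Or.inl ⟨i, hi, rfl⟩⟩
      · obtain ⟨k, hk, hm | hm⟩ := h2
        · exact ⟨_, hm, Or.inr (Or.inl ⟨k, hk, Or.inl rfl⟩)⟩
        · exact ⟨_, hm, Or.inr (Or.inl ⟨k, hk, Or.inr rfl⟩)⟩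
      · exact ⟨_, h3, Or.inr (Or.inr (Or.inl rfl))⟩
      · obtain ⟨o, ho, hm⟩ := h4; exact ⟨_, hm, Or.inr (Or.inr (Or.inr ⟨o, ho, rfl⟩))⟩
    · rintro ⟨x, hx, (⟨i, hi, rfl⟩ | ⟨k, hk, (rfl | rfl)⟩ | rfl | ⟨o, ho, rfl⟩)⟩
      · exact Or.inl ⟨i, hi, hx⟩
      · exact Or.inr (Or.inl ⟨k, hk, Or.inl hx⟩)
      · exact Or.inr (Or.inl ⟨k, hk, Or.inr hx⟩)
      · exact Or.inr (Or.inr (Or.inl hx))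
      · exact Or.inr (Or.inr (Or.inr ⟨o, ho, hx⟩))
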